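-- pv_equiv track=rewrite | github.com/nandkishorrathodk-art/Ironcliw-ai | backend/vision/intelligent_orchestrator.py | _detect_multitasking_pattern
-- ===== SOURCE A (Python) =====
-- from typing import Dict, List, Optional, Any, Tuple, Set
--
-- def _detect_multitasking_pattern(space_apps: Dict[int, List[str]], captured_content: Dict[str, Any]) -> bool:
--     """Detect multitasking workflow pattern"""
--     # Multitasking is detected if there are multiple different types of activities
--     activity_types = set()
--
--     for space_id, apps in space_apps.items():
--         if any(app in ["Cursor", "Code", "Sublime Text"] for app in apps):
--             activity_types.add("development")
--         if any(app in ["Google Chrome", "Safari"] for app in apps):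
--             activity_types.add("research")
--         if any(app in ["Slack", "Discord", "Mail"] for app in apps):
--             activity_types.add("communication")
--         if any(app in ["Terminal", "iTerm2"] for app in apps):
--             activity_types.add("terminal")
--
--     return len(activity_types) >= 3
-- ===== SOURCE B (Python) =====
-- # B: one indexed pass per app via a category table, instead of four any() scans per space.
-- APP_CATEGORIES = {
--     "Cursor": "development", "Code": "development", "Sublime Text": "development",
--     "Google Chrome": "research", "Safari": "research",
--     "Slack": "communication", "Discord": "communication", "Mail": "communication",
--     "Terminal": "terminal", "iTerm2": "terminal",
-- }
--
--
-- def _detect_multitasking_pattern(space_apps, captured_content):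
--     activity_types = set()
--     for apps in space_apps.values():
--         for app in apps:
--             category = APP_CATEGORIES.get(app)
--             if category is not None:
--                 activity_types.add(category)
--     return len(activity_types) >= 3
-- ===== Notes on version B (the rewrite author's own statement) =====
-- stated objective: faster
-- what changed: Replaces the four any()-membership scans per space by a single pass over each space's apps with one category-table (dict) lookup per app, accumulating categories into the set.
import Mathlib
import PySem

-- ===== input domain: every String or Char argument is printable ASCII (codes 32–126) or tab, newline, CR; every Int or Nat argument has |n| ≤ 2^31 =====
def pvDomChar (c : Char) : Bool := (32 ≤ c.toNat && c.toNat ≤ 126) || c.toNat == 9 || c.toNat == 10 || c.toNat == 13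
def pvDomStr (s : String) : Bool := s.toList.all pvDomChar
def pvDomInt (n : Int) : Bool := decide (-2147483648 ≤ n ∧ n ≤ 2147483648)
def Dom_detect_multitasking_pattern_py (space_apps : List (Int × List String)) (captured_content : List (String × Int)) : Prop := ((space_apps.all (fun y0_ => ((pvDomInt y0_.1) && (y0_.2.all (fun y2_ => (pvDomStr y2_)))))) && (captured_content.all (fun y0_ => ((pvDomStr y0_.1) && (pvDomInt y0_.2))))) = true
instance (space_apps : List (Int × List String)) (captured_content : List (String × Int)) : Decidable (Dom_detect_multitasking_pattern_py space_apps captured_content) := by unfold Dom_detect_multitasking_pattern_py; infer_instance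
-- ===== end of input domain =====

-- ===== PORT A =====
-- B replaces A's four per-space any()-membership scans by one category-table lookup per app; equal return value proved.
def stepA (acc : PySem.Set String) (p : Int × List String) : PySem.Set String :=
  let acc := if p.2.any (fun app => decide (app ∈ (["Cursor", "Code", "Sublime Text"] : List String))) then PySem.Set.add acc "development" else acc
  let acc := if p.2.any (fun app => decide (app ∈ (["Google Chrome", "Safari"] : List String))) then PySem.Set.add acc "research" else acc
  let acc := if p.2.any (fun app => decide (app ∈ (["Slack", "Discord", "Mail"] : List String))) then PySem.Set.add acc "communication" else acc
  let acc := if p.2.any (fun app => decide (app ∈ (["Terminal", "iTerm2"] : List String))) then PySem.Set.add acc "terminal" else acc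
  acc

def detect_multitasking_pattern_py (space_apps : List (Int × List String)) (captured_content : List (String × Int)) : Bool :=
  let activity_types : PySem.Set String := space_apps.foldl stepA PySem.Set.empty
  decide (3 ≤ PySem.Set.len activity_types)

-- ===== PORT B =====
def appCategories : PySem.Dict String String := PySem.Dict.ofList
  [("Cursor", "development"), ("Code", "development"), ("Sublime Text", "development"),
   ("Google Chrome", "research"), ("Safari", "research"),
   ("Slack", "communication"), ("Discord", "communication"), ("Mail", "communication"),
   ("Terminal", "terminal"), ("iTerm2", "terminal")]

def stepBapp (acc : PySem.Set String) (app : String) : PySem.Set String :=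
  match appCategories.get? app with
  | some c => PySem.Set.add acc c
  | none => acc

def detect_multitasking_pattern_py_alt (space_apps : List (Int × List String)) (captured_content : List (String × Int)) : Bool :=
  let activity_types : PySem.Set String :=
    space_apps.foldl (fun acc p => p.2.foldl stepBapp acc) PySem.Set.empty
  decide (3 ≤ PySem.Set.len activity_types)

-- ===== PRECONDITION & SPEC =====
def Spec_detect_multitasking_pattern_py (space_apps : List (Int × List String)) (captured_content : List (String × Int)) (out : Bool) : Prop := out = detect_multitasking_pattern_py_alt space_apps captured_content
instance (space_apps : List (Int × List String)) (captured_content : List (String × Int)) (out : Bool) : Decidable (Spec_detect_multitasking_pattern_py space_apps captured_content out) := by unfold Spec_detect_multitasking_pattern_py; infer_instance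

-- ===== CLAIM (what is proved, stated in full; the proofs are below) =====
def Claim_equal_detect_multitasking_pattern_py : Prop := ∀ (space_apps : List (Int × List String)) (captured_content : List (String × Int)), Dom_detect_multitasking_pattern_py space_apps captured_content → Spec_detect_multitasking_pattern_py space_apps captured_content (detect_multitasking_pattern_py space_apps captured_content)

-- ===== LEMMAS AND PROOFS =====
lemma get_cat (app c : String) :
    appCategories.get? app = some c ↔
      (app ∈ (["Cursor", "Code", "Sublime Text"] : List String) ∧ c = "development") ∨
      (app ∈ (["Google Chrome", "Safari"] : List String) ∧ c = "research") ∨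
      (app ∈ (["Slack", "Discord", "Mail"] : List String) ∧ c = "communication") ∨
      (app ∈ (["Terminal", "iTerm2"] : List String) ∧ c = "terminal") := by
  have h : appCategories = PySem.Dict.mk
      [("Cursor", "development"), ("Code", "development"), ("Sublime Text", "development"),
       ("Google Chrome", "research"), ("Safari", "research"),
       ("Slack", "communication"), ("Discord", "communication"), ("Mail", "communication"),
       ("Terminal", "terminal"), ("iTerm2", "terminal")] := by decide
  rw [h]
  simp only [PySem.Dict.get?_mk_cons, beq_iff_eq, List.mem_cons, List.not_mem_nil]
  split_ifs <;> subst_vars <;> simp [PySem.Dict.get?] <;> tauto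

lemma exists_cat (apps : List String) (x : String) :
    (∃ app ∈ apps, appCategories.get? app = some x) ↔
      (x = "development" ∧ apps.any (fun app => decide (app ∈ (["Cursor", "Code", "Sublime Text"] : List String))) = true) ∨
      (x = "research" ∧ apps.any (fun app => decide (app ∈ (["Google Chrome", "Safari"] : List String))) = true) ∨
      (x = "communication" ∧ apps.any (fun app => decide (app ∈ (["Slack", "Discord", "Mail"] : List String))) = true) ∨
      (x = "terminal" ∧ apps.any (fun app => decide (app ∈ (["Terminal", "iTerm2"] : List String))) = true) := by
  simp only [List.any_eq_true, decide_eq_true_eq, get_cat]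
  constructor
  · rintro ⟨app, hm, (⟨h, rfl⟩ | ⟨h, rfl⟩ | ⟨h, rfl⟩ | ⟨h, rfl⟩)⟩
    · exact Or.inl ⟨rfl, app, hm, h⟩
    · exact Or.inr (Or.inl ⟨rfl, app, hm, h⟩)
    · exact Or.inr (Or.inr (Or.inl ⟨rfl, app, hm, h⟩))
    · exact Or.inr (Or.inr (Or.inr ⟨rfl, app, hm, h⟩))
  · rintro (⟨rfl, app, hm, h⟩ | ⟨rfl, app, hm, h⟩ | ⟨rfl, app, hm, h⟩ | ⟨rfl, app, hm, h⟩)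
    · exact ⟨app, hm, Or.inl ⟨h, rfl⟩⟩
    · exact ⟨app, hm, Or.inr (Or.inl ⟨h, rfl⟩)⟩
    · exact ⟨app, hm, Or.inr (Or.inr (Or.inl ⟨h, rfl⟩))⟩
    · exact ⟨app, hm, Or.inr (Or.inr (Or.inr ⟨h, rfl⟩))⟩

lemma step_memA (acc : PySem.Set String) (p : Int × List String) (x : String) :
    x ∈ stepA acc p ↔ x ∈ acc ∨ ∃ app ∈ p.2, appCategories.get? app = some x := by
  rw [exists_cat]
  unfold stepA
  split_ifs <;> simp only [PySem.Set.mem_add] <;> tauto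

lemma mem_foldA (l : List (Int × List String)) (acc : PySem.Set String) (x : String) :
    x ∈ l.foldl stepA acc ↔ x ∈ acc ∨ ∃ p ∈ l, ∃ app ∈ p.2, appCategories.get? app = some x := by
  induction l generalizing acc with
  | nil => simp
  | cons a t ih =>
    rw [List.foldl_cons, ih, step_memA]
    simp only [List.mem_cons]
    constructor
    · rintro ((h | ⟨app, hm, hg⟩) | ⟨p, hp, hrest⟩)
      · exact Or.inl h
      · exact Or.inr ⟨a, Or.inl rfl, app, hm, hg⟩
      · exact Or.inr ⟨p, Or.inr hp, hrest⟩
    · rintro (h | ⟨p, (rfl | hp), hrest⟩)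
      · exact Or.inl (Or.inl h)
      · exact Or.inl (Or.inr hrest)
      · exact Or.inr ⟨p, hp, hrest⟩

lemma mem_foldB_inner (apps : List String) (acc : PySem.Set String) (x : String) :
    x ∈ apps.foldl stepBapp acc ↔ x ∈ acc ∨ ∃ app ∈ apps, appCategories.get? app = some x := by
  induction apps generalizing acc with
  | nil => simp
  | cons a t ih =>
    rw [List.foldl_cons, ih]
    have hsplit : (∃ app ∈ a :: t, appCategories.get? app = some x) ↔
        appCategories.get? a = some x ∨ ∃ app ∈ t, appCategories.get? app = some x := by
      simp only [List.mem_cons]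
      constructor
      · rintro ⟨app, (rfl | hm), hg⟩
        · exact Or.inl hg
        · exact Or.inr ⟨app, hm, hg⟩
      · rintro (hg | ⟨app, hm, hg⟩)
        · exact ⟨a, Or.inl rfl, hg⟩
        · exact ⟨app, Or.inr hm, hg⟩
    rw [hsplit]
    cases hc : appCategories.get? a with
    | none => simp [stepBapp, hc]
    | some c =>
      simp only [stepBapp, hc, PySem.Set.mem_add, Option.some.injEq, @eq_comm _ c x]
      tauto

lemma mem_foldB (l : List (Int × List String)) (acc : PySem.Set String) (x : String) :
    x ∈ l.foldl (fun acc p => p.2.foldl stepBapp acc) acc ↔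
      x ∈ acc ∨ ∃ p ∈ l, ∃ app ∈ p.2, appCategories.get? app = some x := by
  induction l generalizing acc with
  | nil => simp
  | cons a t ih =>
    rw [List.foldl_cons, ih]
    rw [mem_foldB_inner]
    simp only [List.mem_cons]
    constructor
    · rintro ((h | hex) | ⟨p, hp, hrest⟩)
      · exact Or.inl h
      · exact Or.inr ⟨a, Or.inl rfl, hex⟩
      · exact Or.inr ⟨p, Or.inr hp, hrest⟩
    · rintro (h | ⟨p, (rfl | hp), hrest⟩)
      · exact Or.inl (Or.inl h)
      · exact Or.inl (Or.inr hrest)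
      · exact Or.inr ⟨p, hp, hrest⟩

lemma nodup_foldA (l : List (Int × List String)) :
    ∀ acc : PySem.Set String, acc.Nodup → (l.foldl stepA acc).Nodup := by
  induction l with
  | nil => exact fun _ h => h
  | cons a t ih =>
    intro acc h
    rw [List.foldl_cons]
    refine ih _ ?_
    unfold stepA
    split_ifs <;> repeat first | assumption | apply PySem.Set.nodup_add

lemma nodup_foldB_inner (apps : List String) :
    ∀ acc : PySem.Set String, acc.Nodup → (apps.foldl stepBapp acc).Nodup := by
  induction apps with
  | nil => exact fun _ h => h
  | cons b tb ih =>
    intro acc h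
    rw [List.foldl_cons]
    refine ih _ ?_
    unfold stepBapp
    cases appCategories.get? b
    · exact h
    · exact PySem.Set.nodup_add _ _ h

lemma nodup_foldB (l : List (Int × List String)) :
    ∀ acc : PySem.Set String, acc.Nodup →
      (l.foldl (fun acc p => p.2.foldl stepBapp acc) acc).Nodup := by
  induction l with
  | nil => exact fun _ h => h
  | cons a t ih =>
    intro acc h
    rw [List.foldl_cons]
    exact ih _ (nodup_foldB_inner a.2 acc h)

-- ===== VERDICT (by name: the statement is the Claim_ definition above) =====
theorem detect_multitasking_pattern_py_spec : Claim_equal_detect_multitasking_pattern_py := by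
  intro space_apps captured_content _
  unfold Spec_detect_multitasking_pattern_py detect_multitasking_pattern_py
    detect_multitasking_pattern_py_alt
  have hempty : (PySem.Set.empty : PySem.Set String).Nodup := List.nodup_nil
  have hperm : (space_apps.foldl stepA PySem.Set.empty).Perm
      (space_apps.foldl (fun acc p => p.2.foldl stepBapp acc) PySem.Set.empty) :=
    (List.perm_ext_iff_of_nodup (nodup_foldA _ _ hempty) (nodup_foldB _ _ hempty)).mpr
      (fun x => by rw [mem_foldA, mem_foldB])
  simp only [PySem.Set.len, hperm.length_eq]
  rfl
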